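-- pv_equiv track=rewrite | github.com/The-Magic-Unicorns/pythonescaperoom | classes/MagicSquare.py | deployEven4k
-- ===== SOURCE A (Python) =====
-- def deployEven4k(dim, grid):
--     k = int(dim / 4)
--     dim2 = int(2 * k)
--     row = 0
--     col = 0
--     fields = dim * dim
--     j = fields
--     i = 1
--     for x in range(fields):
--         if (row < k or row >= dim2 + k) and (col < k or col >= dim2 + k):
--             grid[row][col] = j
--             j -= 1
--         elif (row >= k and row < (dim2 + k)) and (col >= k and col < (dim2 + k)):
--             grid[row][col] = j
--             j -= 1
--         else:
--             grid[row][col] = i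
--             i += 1
--         col += 1
--         if col >= dim:
--             col = 0
--             row += 1
--     return grid
-- ===== SOURCE B (Python) =====
-- def deployEven4k(dim, grid):
--     # Two gated passes over the square: ascending counter fills the unmarked
--     # band cells, then a descending counter fills the marked (corner/centre) cells.
--     k = int(dim / 4)
--     lo, hi = k, 2 * k + k
--
--     def marked(r, c):
--         return (lo <= r < hi) == (lo <= c < hi)
--
--     n = 0
--     for r in range(dim):
--         for c in range(dim):
--             if not marked(r, c):
--                 n += 1
--                 grid[r][c] = n
--     n = dim * dim
--     for r in range(dim):
--         for c in range(dim):
--             if marked(r, c):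
--                 grid[r][c] = n
--                 n -= 1
--     return grid
-- ===== Notes on version B (the rewrite author's own statement) =====
-- stated objective: alternative
-- what changed: A's single pass with manual row/col wrap bookkeeping and a three-way branch is replaced by a closed 'marked' predicate (band membership of row equals band membership of col) and two gated nested passes: one ascending counter writing the unmarked cells, one descending counter writing the marked cells.
-- outside the precondition, e.g. on deployEven4k(-1, [[5]]): A returns [[1]], B returns [[5]]
import Mathlib
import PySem

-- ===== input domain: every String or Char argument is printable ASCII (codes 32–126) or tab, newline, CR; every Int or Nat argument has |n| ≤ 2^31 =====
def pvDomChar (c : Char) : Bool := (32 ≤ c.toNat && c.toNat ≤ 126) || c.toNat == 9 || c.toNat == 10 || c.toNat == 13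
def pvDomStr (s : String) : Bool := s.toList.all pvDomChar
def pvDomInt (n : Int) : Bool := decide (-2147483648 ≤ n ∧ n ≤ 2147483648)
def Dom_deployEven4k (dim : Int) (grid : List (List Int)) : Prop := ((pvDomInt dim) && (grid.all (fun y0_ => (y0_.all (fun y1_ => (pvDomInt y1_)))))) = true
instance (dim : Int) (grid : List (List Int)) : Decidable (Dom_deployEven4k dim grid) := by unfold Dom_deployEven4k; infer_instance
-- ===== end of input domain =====

-- B replaces A's single pass with manual row/col wrap bookkeeping by a 'marked' band
-- predicate and two gated counter passes (alternative decomposition, same cost).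
-- Both Pythons mutate `grid` in place identically; the equivalence proved here is
-- about the returned value (which is that same fully-overwritten grid).

-- ===== PORT A =====
-- grid[row][col] = v  (exact for 0 ≤ row/col in range, which Pre_ guarantees)
def setCell (g : List (List Int)) (r c : Int) (v : Int) : List (List Int) :=
  g.set r.toNat (((g[r.toNat]?).getD []).set c.toNat v)

def deployEven4k (dim : Int) (grid : List (List Int)) : List (List Int) :=
  let k : Int := dim.tdiv 4          -- int(dim / 4): truncating division (exact on Dom)
  let dim2 : Int := 2 * k
  let fields : Int := dim * dim
  let st := (PySem.List.pyRange 0 fields 1).foldl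
    (fun (st : List (List Int) × Int × Int × Int × Int) _ =>
      let (g, row, col, i, j) := st
      let (g, i, j) :=
        if (decide (row < k) || decide (row ≥ dim2 + k)) &&
           (decide (col < k) || decide (col ≥ dim2 + k)) then
          (setCell g row col j, i, j - 1)
        else if (decide (row ≥ k) && decide (row < dim2 + k)) &&
                (decide (col ≥ k) && decide (col < dim2 + k)) then
          (setCell g row col j, i, j - 1)
        else
          (setCell g row col i, i + 1, j)
      let col := col + 1
      if col ≥ dim then (g, row + 1, 0, i, j) else (g, row, col, i, j))
    (grid, 0, 0, 1, fields)
  st.1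

-- ===== PORT B =====
def bMarked (lo hi r c : Int) : Bool :=
  decide (lo ≤ r ∧ r < hi) == decide (lo ≤ c ∧ c < hi)

def deployEven4k_alt (dim : Int) (grid : List (List Int)) : List (List Int) :=
  let k : Int := dim.tdiv 4
  let lo : Int := k
  let hi : Int := 2 * k + k
  let p1 := (PySem.List.pyRange 0 dim 1).foldl
    (fun (st : List (List Int) × Int) r =>
      (PySem.List.pyRange 0 dim 1).foldl
        (fun (st : List (List Int) × Int) c =>
          if !(bMarked lo hi r c) then (setCell st.1 r c (st.2 + 1), st.2 + 1) else st)
        st)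
    (grid, 0)
  let p2 := (PySem.List.pyRange 0 dim 1).foldl
    (fun (st : List (List Int) × Int) r =>
      (PySem.List.pyRange 0 dim 1).foldl
        (fun (st : List (List Int) × Int) c =>
          if bMarked lo hi r c then (setCell st.1 r c st.2, st.2 - 1) else st)
        st)
    (p1.1, dim * dim)
  p2.1

-- ===== PRECONDITION & SPEC =====
-- Pre_ excludes grids with fewer than dim rows or a row shorter than dim among the
-- first dim (Python A raises IndexError there), and negative dim, on which A's
-- column-reset bookkeeping degenerates to walking down the first column of dim*dim
-- rows — an artefact of its implementation (see cites).
def Pre_deployEven4k (dim : Int) (grid : List (List Int)) : Prop :=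
  0 ≤ dim ∧ dim.toNat ≤ grid.length ∧
    ∀ row ∈ grid.take dim.toNat, dim.toNat ≤ row.length
instance (dim : Int) (grid : List (List Int)) : Decidable (Pre_deployEven4k dim grid) := by
  unfold Pre_deployEven4k; infer_instance

def pvWitness_deployEven4k : Int × List (List Int) :=
  (4, [[0,0,0,0],[0,0,0,0],[0,0,0,0],[0,0,0,0]])

def Spec_deployEven4k (dim : Int) (grid : List (List Int)) (out : List (List Int)) : Prop := out = deployEven4k_alt dim grid
instance (dim : Int) (grid : List (List Int)) (out : List (List Int)) : Decidable (Spec_deployEven4k dim grid out) := by unfold Spec_deployEven4k; infer_instance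

-- ===== CLAIM (what is proved, stated in full; the proofs are below) =====
def Claim_equal_deployEven4k : Prop := ∀ (dim : Int) (grid : List (List Int)), Dom_deployEven4k dim grid → Pre_deployEven4k dim grid → Spec_deployEven4k dim grid (deployEven4k dim grid)

-- ===== LEMMAS AND PROOFS =====

-- combined per-cell step (A's branch structure expressed through the band predicate)
def cstep (lo hi : Int) (st : List (List Int) × Int × Int) (p : Int × Int) :
    List (List Int) × Int × Int :=
  if bMarked lo hi p.1 p.2 then (setCell st.1 p.1 p.2 st.2.2, st.2.1, st.2.2 - 1)
  else (setCell st.1 p.1 p.2 st.2.1, st.2.1 + 1, st.2.2)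

-- A's loop body, as a named function (definitionally the port's lambda)
def stepA (dim k : Int) (st : List (List Int) × Int × Int × Int × Int) :
    List (List Int) × Int × Int × Int × Int :=
  let (g, row, col, i, j) := st
  let (g, i, j) :=
    if (decide (row < k) || decide (row ≥ 2 * k + k)) &&
       (decide (col < k) || decide (col ≥ 2 * k + k)) then
      (setCell g row col j, i, j - 1)
    else if (decide (row ≥ k) && decide (row < 2 * k + k)) &&
            (decide (col ≥ k) && decide (col < 2 * k + k)) then
      (setCell g row col j, i, j - 1)
    else
      (setCell g row col i, i + 1, j)
  let col := col + 1
  if col ≥ dim then (g, row + 1, 0, i, j) else (g, row, col, i, j)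

def iterA (dim k : Int) : Nat → (List (List Int) × Int × Int × Int × Int) →
    List (List Int) × Int × Int × Int × Int
  | 0, s => s
  | m + 1, s => iterA dim k m (stepA dim k s)

def colsL (row col : Int) (m : Nat) : List (Int × Int) :=
  (List.range m).map (fun (t : Nat) => (row, col + (t : Int)))

def blockL (row : Int) (R n : Nat) : List (Int × Int) :=
  (List.range R).flatMap (fun (t : Nat) => colsL (row + (t : Int)) 0 n)

def cellsL (n : Nat) : List (Int × Int) :=
  (List.range n).flatMap (fun (r : Nat) => (List.range n).map (fun (c : Nat) => ((r : Int), (c : Int))))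

-- B's two loop bodies, named
def ustep (lo hi : Int) (st : List (List Int) × Int) (p : Int × Int) : List (List Int) × Int :=
  if !(bMarked lo hi p.1 p.2) then (setCell st.1 p.1 p.2 (st.2 + 1), st.2 + 1) else st

def dstep (lo hi : Int) (st : List (List Int) × Int) (p : Int × Int) : List (List Int) × Int :=
  if bMarked lo hi p.1 p.2 then (setCell st.1 p.1 p.2 st.2, st.2 - 1) else st

theorem portA_unfold (dim : Int) (grid : List (List Int)) :
    deployEven4k dim grid =
      ((PySem.List.pyRange 0 (dim * dim) 1).foldl
        (fun s _ => stepA dim (dim.tdiv 4) s) (grid, 0, 0, 1, dim * dim)).1 := rfl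

theorem foldl_const_iterA (dim k : Int) :
    ∀ (L : List Int) s, L.foldl (fun s _ => stepA dim k s) s = iterA dim k L.length s := by
  intro L
  induction L with
  | nil => intro s; rfl
  | cons a t ih => intro s; simpa [iterA] using ih (stepA dim k s)

theorem bnot_band (k a : Int) :
    (decide (a < k) || decide (a ≥ 2 * k + k)) = !decide (k ≤ a ∧ a < 2 * k + k) := by
  by_cases h : k ≤ a ∧ a < 2 * k + k <;> simp [h] <;> omega

theorem band_pos (k a : Int) :
    (decide (a ≥ k) && decide (a < 2 * k + k)) = decide (k ≤ a ∧ a < 2 * k + k) := by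
  by_cases h : k ≤ a ∧ a < 2 * k + k <;> simp [h] <;> omega

theorem stepA_eq (dim k : Int) (g : List (List Int)) (row col i j : Int) :
    stepA dim k (g, row, col, i, j) =
      (let t := cstep k (2 * k + k) (g, i, j) (row, col)
       if col + 1 ≥ dim then (t.1, row + 1, 0, t.2.1, t.2.2)
       else (t.1, row, col + 1, t.2.1, t.2.2)) := by
  simp only [stepA, cstep, bMarked, bnot_band, band_pos]
  cases hp : decide (k ≤ row ∧ row < 2 * k + k) <;>
    cases hq : decide (k ≤ col ∧ col < 2 * k + k) <;>
      simp

theorem colsL_cons (row col : Int) (m : Nat) :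
    colsL row col (m + 1) = (row, col) :: colsL row (col + 1) m := by
  unfold colsL
  rw [List.range_succ_eq_map, List.map_cons, List.map_map]
  congr 1
  · norm_num
  · apply List.map_congr_left
    intro t _
    show (row, col + ((t + 1 : Nat) : Int)) = (row, col + 1 + (t : Int))
    congr 1
    push_cast
    ring

theorem iterA_row (dim k : Int) :
    ∀ (m : Nat) (g : List (List Int)) (row col i j : Int),
      0 < m → col + (m : Int) = dim →
      iterA dim k m (g, row, col, i, j) =
        (let t := (colsL row col m).foldl (cstep k (2 * k + k)) (g, i, j)
         (t.1, row + 1, 0, t.2.1, t.2.2)) := by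
  intro m
  induction m with
  | zero => intro g row col i j hm; exact absurd hm (by omega)
  | succ m ih =>
    intro g row col i j _ hcol
    rcases Nat.eq_zero_or_pos m with hm0 | hmpos
    · subst hm0
      have hwrap : col + 1 ≥ dim := by push_cast at hcol; omega
      simp only [iterA, stepA_eq, hwrap, if_pos, colsL_cons]
      simp [colsL]
    · have hnw : ¬ (col + 1 ≥ dim) := by push_cast at hcol; omega
      simp only [iterA, stepA_eq, hnw, if_false]
      rw [ih _ _ _ _ _ hmpos (by push_cast at hcol ⊢; omega)]
      rw [colsL_cons]
      simp [List.foldl_cons]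

theorem iterA_add (dim k : Int) :
    ∀ (a b : Nat) s, iterA dim k (a + b) s = iterA dim k b (iterA dim k a s) := by
  intro a
  induction a with
  | zero => intro b s; simp [iterA]
  | succ a ih =>
    intro b s
    have : a + 1 + b = (a + b) + 1 := by omega
    rw [this]
    simpa [iterA] using ih b (stepA dim k s)

theorem blockL_succ (row : Int) (R n : Nat) :
    blockL row (R + 1) n = colsL row 0 n ++ blockL (row + 1) R n := by
  unfold blockL
  rw [List.range_succ_eq_map, List.flatMap_cons, List.flatMap_map]
  congr 1
  · norm_num
  · apply List.flatMap_congr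
    intro t _
    show colsL (row + ((t + 1 : Nat) : Int)) 0 n = colsL (row + 1 + (t : Int)) 0 n
    congr 1
    push_cast
    ring

theorem iterA_block (dim k : Int) (hd : 0 < dim) :
    ∀ (R : Nat) (g : List (List Int)) (row i j : Int),
      iterA dim k (R * dim.toNat) (g, row, 0, i, j) =
        (let t := (blockL row R dim.toNat).foldl (cstep k (2 * k + k)) (g, i, j)
         (t.1, row + (R : Int), 0, t.2.1, t.2.2)) := by
  intro R
  induction R with
  | zero => intro g row i j; simp [iterA, blockL]
  | succ R ih =>
    intro g row i j
    have hsm : (R + 1) * dim.toNat = dim.toNat + R * dim.toNat := by ring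
    rw [hsm, iterA_add]
    have hn : (0 : Int) + (dim.toNat : Int) = dim := by
      simp [Int.toNat_of_nonneg (le_of_lt hd)]
    rw [iterA_row dim k dim.toNat g row 0 i j (by omega) hn]
    simp only
    rw [ih]
    rw [blockL_succ, List.foldl_append]
    simp only [Prod.mk.injEq, true_and, and_true]
    push_cast
    ring

theorem blockL_eq_cellsL (n : Nat) : blockL 0 n n = cellsL n := by
  unfold blockL cellsL
  apply List.flatMap_congr
  intro r _
  unfold colsL
  apply List.map_congr_left
  intro c _
  show ((0 : Int) + (r : Int), (0 : Int) + (c : Int)) = ((r : Int), (c : Int))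
  norm_num

-- A as a fold of the combined step over the cell list
theorem portA_cells (dim : Int) (grid : List (List Int)) (hd : 0 ≤ dim) :
    deployEven4k dim grid =
      ((cellsL dim.toNat).foldl (cstep (dim.tdiv 4) (2 * (dim.tdiv 4) + dim.tdiv 4))
        (grid, 1, dim * dim)).1 := by
  rcases lt_or_eq_of_le hd with hpos | hzero
  · rw [portA_unfold, foldl_const_iterA]
    have hlen : (PySem.List.pyRange 0 (dim * dim) 1).length = dim.toNat * dim.toNat := by
      rw [PySem.List.length_pyRange_one]
      have : dim * dim - 0 = ((dim.toNat * dim.toNat : Nat) : Int) := by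
        push_cast [Int.toNat_of_nonneg hd]; ring
      rw [this, Int.toNat_natCast]
    rw [hlen, iterA_block dim (dim.tdiv 4) hpos dim.toNat grid 0 1 (dim * dim)]
    rw [blockL_eq_cellsL]
  · rw [portA_unfold]
    have hdd : dim * dim = 0 := by rw [← hzero]; ring
    have h0 : dim.toNat = 0 := by omega
    rw [hdd, h0]
    rw [PySem.List.pyRange_one_eq_nil (by omega)]
    simp [cellsL]

-- setCell at distinct (toNat) positions commutes
theorem setCell_comm (g : List (List Int)) (r c r' c' v w : Int)
    (h : (r.toNat, c.toNat) ≠ (r'.toNat, c'.toNat)) :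
    setCell (setCell g r c v) r' c' w = setCell (setCell g r' c' w) r c v := by
  by_cases hr : r.toNat = r'.toNat
  · have hc : c.toNat ≠ c'.toNat := by
      intro hc; exact h (by rw [hr, hc])
    simp only [setCell, hr]
    by_cases hlt : r'.toNat < g.length
    · rw [List.getElem?_set_self hlt, List.getElem?_set_self hlt]
      simp only [Option.getD_some, List.set_set]
      rw [List.set_comm _ _ hc]
    · have hle : g.length ≤ r'.toNat := by omega
      simp [List.set_eq_of_length_le hle]
  · simp only [setCell]
    rw [List.getElem?_set_ne hr, List.getElem?_set_ne (Ne.symm hr),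
      List.set_comm _ _ hr]

-- positions in a grid band predicate: differing mark forces distinct positions
theorem ne_of_marked_ne (lo hi : Int) (p q : Int × Int)
    (hp : 0 ≤ p.1) (hp2 : 0 ≤ p.2) (hq : 0 ≤ q.1) (hq2 : 0 ≤ q.2)
    (hm : bMarked lo hi p.1 p.2 ≠ bMarked lo hi q.1 q.2) :
    (p.1.toNat, p.2.toNat) ≠ (q.1.toNat, q.2.toNat) := by
  intro he
  apply hm
  have h1 : p.1 = q.1 := by
    have := congrArg Prod.fst he; simp at this; omega
  have h2 : p.2 = q.2 := by
    have := congrArg Prod.snd he; simp at this; omega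
  rw [h1, h2]

-- step reductions for the three loop bodies
theorem ustep_mark (lo hi : Int) (st : List (List Int) × Int) (p : Int × Int)
    (h : bMarked lo hi p.1 p.2 = true) : ustep lo hi st p = st := by
  simp [ustep, h]

theorem ustep_unmark (lo hi : Int) (st : List (List Int) × Int) (p : Int × Int)
    (h : bMarked lo hi p.1 p.2 = false) :
    ustep lo hi st p = (setCell st.1 p.1 p.2 (st.2 + 1), st.2 + 1) := by
  simp [ustep, h]

theorem dstep_mark (lo hi : Int) (st : List (List Int) × Int) (p : Int × Int)
    (h : bMarked lo hi p.1 p.2 = true) :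
    dstep lo hi st p = (setCell st.1 p.1 p.2 st.2, st.2 - 1) := by
  simp [dstep, h]

theorem dstep_unmark (lo hi : Int) (st : List (List Int) × Int) (p : Int × Int)
    (h : bMarked lo hi p.1 p.2 = false) : dstep lo hi st p = st := by
  simp [dstep, h]

theorem cstep_mark (lo hi : Int) (st : List (List Int) × Int × Int) (p : Int × Int)
    (h : bMarked lo hi p.1 p.2 = true) :
    cstep lo hi st p = (setCell st.1 p.1 p.2 st.2.2, st.2.1, st.2.2 - 1) := by
  simp [cstep, h]

theorem cstep_unmark (lo hi : Int) (st : List (List Int) × Int × Int) (p : Int × Int)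
    (h : bMarked lo hi p.1 p.2 = false) :
    cstep lo hi st p = (setCell st.1 p.1 p.2 st.2.1, st.2.1 + 1, st.2.2) := by
  simp [cstep, h]

-- a marked write commutes past the ascending (unmarked-only) pass
theorem pass1_set (lo hi : Int) :
    ∀ (L : List (Int × Int)), (∀ q ∈ L, 0 ≤ q.1 ∧ 0 ≤ q.2) →
    ∀ (g : List (List Int)) (m : Int) (p : Int × Int) (v : Int),
      0 ≤ p.1 → 0 ≤ p.2 → bMarked lo hi p.1 p.2 = true →
      L.foldl (ustep lo hi) (setCell g p.1 p.2 v, m) =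
        (setCell (L.foldl (ustep lo hi) (g, m)).1 p.1 p.2 v,
         (L.foldl (ustep lo hi) (g, m)).2) := by
  intro L
  induction L with
  | nil => intro _ g m p v _ _ _; rfl
  | cons q t ih =>
    intro hL g m p v hp1 hp2 hpm
    have hq := hL q (by simp)
    have ht : ∀ x ∈ t, 0 ≤ x.1 ∧ 0 ≤ x.2 := fun x hx => hL x (by simp [hx])
    by_cases hqm : bMarked lo hi q.1 q.2
    · rw [List.foldl_cons, List.foldl_cons, ustep_mark lo hi _ q hqm,
        ustep_mark lo hi _ q hqm]
      exact ih ht g m p v hp1 hp2 hpm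
    · have hqm' : bMarked lo hi q.1 q.2 = false := by simpa using hqm
      rw [List.foldl_cons, List.foldl_cons, ustep_unmark lo hi _ q hqm',
        ustep_unmark lo hi _ q hqm']
      simp only
      have hne : (p.1.toNat, p.2.toNat) ≠ (q.1.toNat, q.2.toNat) :=
        ne_of_marked_ne lo hi p q hp1 hp2 hq.1 hq.2 (by simp [hpm, hqm'])
      rw [setCell_comm g p.1 p.2 q.1 q.2 v (m + 1) hne]
      exact ih ht (setCell g q.1 q.2 (m + 1)) (m + 1) p v hp1 hp2 hpm

-- the two gated passes equal the combined single pass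
theorem two_pass (lo hi : Int) :
    ∀ (L : List (Int × Int)), (∀ q ∈ L, 0 ≤ q.1 ∧ 0 ≤ q.2) →
    ∀ (g : List (List Int)) (m j : Int),
      (L.foldl (dstep lo hi) ((L.foldl (ustep lo hi) (g, m)).1, j)).1 =
        (L.foldl (cstep lo hi) (g, m + 1, j)).1 := by
  intro L
  induction L with
  | nil => intro _ g m j; rfl
  | cons p t ih =>
    intro hL g m j
    have hp := hL p (by simp)
    have ht : ∀ x ∈ t, 0 ≤ x.1 ∧ 0 ≤ x.2 := fun x hx => hL x (by simp [hx])
    by_cases hpm : bMarked lo hi p.1 p.2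
    · rw [List.foldl_cons, List.foldl_cons, List.foldl_cons,
        ustep_mark lo hi _ p hpm, dstep_mark lo hi _ p hpm, cstep_mark lo hi _ p hpm]
      simp only
      have hsw : setCell (t.foldl (ustep lo hi) (g, m)).1 p.1 p.2 j =
          (t.foldl (ustep lo hi) (setCell g p.1 p.2 j, m)).1 := by
        rw [pass1_set lo hi t ht g m p j hp.1 hp.2 hpm]
      rw [hsw]
      exact ih ht (setCell g p.1 p.2 j) m (j - 1)
    · have hpm' : bMarked lo hi p.1 p.2 = false := by simpa using hpm
      rw [List.foldl_cons, List.foldl_cons, List.foldl_cons,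
        ustep_unmark lo hi _ p hpm', dstep_unmark lo hi _ p hpm', cstep_unmark lo hi _ p hpm']
      simp only
      exact ih ht (setCell g p.1 p.2 (m + 1)) (m + 1) j

theorem foldl_nested {σ : Type} (f : σ → (Int × Int) → σ) :
    ∀ (rows : List Int) (cols : List Int) (s : σ),
      rows.foldl (fun s r => cols.foldl (fun s c => f s (r, c)) s) s =
        (rows.flatMap (fun r => cols.map (fun c => (r, c)))).foldl f s := by
  intro rows
  induction rows with
  | nil => intro cols s; rfl
  | cons r t ih =>
    intro cols s
    simp only [List.foldl_cons, List.flatMap_cons, List.foldl_append, List.foldl_map]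
    exact ih cols _

theorem portB_unfold (dim : Int) (grid : List (List Int)) :
    deployEven4k_alt dim grid =
      ((PySem.List.pyRange 0 dim 1).foldl
        (fun st r => (PySem.List.pyRange 0 dim 1).foldl
          (fun st c => dstep (dim.tdiv 4) (2 * dim.tdiv 4 + dim.tdiv 4) st (r, c)) st)
        (((PySem.List.pyRange 0 dim 1).foldl
          (fun st r => (PySem.List.pyRange 0 dim 1).foldl
            (fun st c => ustep (dim.tdiv 4) (2 * dim.tdiv 4 + dim.tdiv 4) st (r, c)) st)
          (grid, 0)).1, dim * dim)).1 := rfl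

theorem pyRange_dim_flat (dim : Int) (hd : 0 ≤ dim) :
    (PySem.List.pyRange 0 dim 1).flatMap
      (fun r => (PySem.List.pyRange 0 dim 1).map (fun c => (r, c))) = cellsL dim.toNat := by
  rw [PySem.List.pyRange_one, List.flatMap_map]
  unfold cellsL
  have he : (dim - 0).toNat = dim.toNat := by omega
  rw [he]
  apply List.flatMap_congr
  intro r _
  rw [List.map_map]
  apply List.map_congr_left
  intro c _
  show ((0 : Int) + (r : Int), (0 : Int) + (c : Int)) = ((r : Int), (c : Int))
  norm_num

theorem portB_cells (dim : Int) (grid : List (List Int)) (hd : 0 ≤ dim) :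
    deployEven4k_alt dim grid =
      ((cellsL dim.toNat).foldl (dstep (dim.tdiv 4) (2 * dim.tdiv 4 + dim.tdiv 4))
        (((cellsL dim.toNat).foldl (ustep (dim.tdiv 4) (2 * dim.tdiv 4 + dim.tdiv 4))
          (grid, 0)).1, dim * dim)).1 := by
  rw [portB_unfold, foldl_nested, foldl_nested, pyRange_dim_flat dim hd]

-- ===== VERDICT (by name: the statement is the Claim_ definition above) =====
theorem deployEven4k_spec : Claim_equal_deployEven4k := by
  intro dim grid _ hpre
  unfold Spec_deployEven4k
  obtain ⟨hd, -, -⟩ := hpre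
  rw [portA_cells dim grid hd, portB_cells dim grid hd]
  have hnn : ∀ q ∈ cellsL dim.toNat, 0 ≤ q.1 ∧ 0 ≤ q.2 := by
    intro q hq
    obtain ⟨r, hr, hq2⟩ := List.mem_flatMap.mp hq
    obtain ⟨c, hc, rfl⟩ := List.mem_map.mp hq2
    exact ⟨Int.natCast_nonneg r, Int.natCast_nonneg c⟩
  rw [two_pass _ _ _ hnn grid 0 (dim * dim)]
  norm_num
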